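-- pv_equiv track=rewrite | github.com/cphouser/smorgasbord | fetchorg.py | fetchOpenWindows
-- ===== SOURCE A (Python) =====
-- def fetchOpenWindows(heading_dict):
--     windows = {}
--     for heading, properties in heading_dict.items():
--         if 'URL' not in properties:
--             continue
--         elif properties['ACTIVEON'] == 'None':
--             continue
--         if properties['ACTIVEON'] in windows:
--             windows[properties['ACTIVEON']].append(properties['URL'])
--         else:
--             windows[properties['ACTIVEON']] = [properties['URL']]
--     return windows
-- ===== SOURCE B (Python) =====
-- def fetchOpenWindows(heading_dict):
--     pairs = [(p['ACTIVEON'], p['URL']) for p in heading_dict.values() if 'URL' in p]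
--     keys = []
--     for k, _ in pairs:
--         if k != 'None' and k not in keys:
--             keys.append(k)
--     return {k: [u for kk, u in pairs if kk == k] for k in keys}
-- ===== Notes on version B (the rewrite author's own statement) =====
-- stated objective: alternative
-- what changed: Instead of one pass that grows a dict with a membership test per item, B first extracts the (ACTIVEON, URL) pairs, then computes the ordered distinct keys, and builds each group by a per-key scan over the pairs (dict comprehension).
import Mathlib
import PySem

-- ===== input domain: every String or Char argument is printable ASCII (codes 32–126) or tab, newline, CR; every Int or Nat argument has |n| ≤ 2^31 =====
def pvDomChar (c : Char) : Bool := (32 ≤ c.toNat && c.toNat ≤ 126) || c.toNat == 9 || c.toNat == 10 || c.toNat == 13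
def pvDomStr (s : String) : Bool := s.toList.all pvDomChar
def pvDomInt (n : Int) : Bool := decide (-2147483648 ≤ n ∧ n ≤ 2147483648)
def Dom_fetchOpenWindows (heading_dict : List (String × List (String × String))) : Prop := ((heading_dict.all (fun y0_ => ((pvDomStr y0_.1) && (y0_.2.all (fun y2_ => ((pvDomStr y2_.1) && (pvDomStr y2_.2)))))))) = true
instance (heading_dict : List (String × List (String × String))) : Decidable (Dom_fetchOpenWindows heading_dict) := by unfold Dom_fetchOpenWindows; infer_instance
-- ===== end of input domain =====

-- B replaces A's one-pass dict-growing loop by: extract (ACTIVEON, URL) pairs, compute the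
-- ordered distinct keys, then build each group by a per-key scan over the pairs (objective: alternative).


-- ===== PORT A =====
-- literal port of A's loop; properties['ACTIVEON'] is totalised with getD "" — outside
-- Pre_fetchOpenWindows (ACTIVEON missing while URL is present) Python raises KeyError there.
def fetchOpenWindows (heading_dict : List (String × List (String × String))) : List (String × List String) :=
  (heading_dict.foldl (fun (windows : PySem.Dict String (List String)) hp =>
    let props := PySem.Dict.ofList hp.2
    if props.contains "URL" = false then windows
    else if props.getD "ACTIVEON" "" = "None" then windows
    else if windows.contains (props.getD "ACTIVEON" "") then
      windows.modify (props.getD "ACTIVEON" "") [] (· ++ [props.getD "URL" ""])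
    else windows.insert (props.getD "ACTIVEON" "") [props.getD "URL" ""])
    PySem.Dict.empty).items

-- ===== PORT B =====
-- literal port of Source B: pairs comprehension, distinct-key loop, per-key grouping comprehension
def fetchOpenWindows_alt (heading_dict : List (String × List (String × String))) : List (String × List String) :=
  let pairs := heading_dict.filterMap (fun hp =>
    let props := PySem.Dict.ofList hp.2
    if props.contains "URL" then some (props.getD "ACTIVEON" "", props.getD "URL" "") else none)
  let keys := pairs.foldl (fun ks kv => if kv.1 ≠ "None" ∧ kv.1 ∉ ks then ks ++ [kv.1] else ks) []
  keys.map (fun k => (k, (pairs.filter (fun kv => kv.1 == k)).map (·.2)))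

-- ===== PRECONDITION & SPEC =====
-- Pre_ excludes exactly the inputs on which Python A raises KeyError: an entry whose
-- properties contain 'URL' but not 'ACTIVEON' (B raises the same KeyError there).
def Pre_fetchOpenWindows (heading_dict : List (String × List (String × String))) : Prop :=
  ∀ hp ∈ heading_dict, (PySem.Dict.ofList hp.2).contains "URL" = true →
    (PySem.Dict.ofList hp.2).contains "ACTIVEON" = true
instance (heading_dict : List (String × List (String × String))) : Decidable (Pre_fetchOpenWindows heading_dict) := by unfold Pre_fetchOpenWindows; infer_instance
def pvWitness_fetchOpenWindows : (List (String × List (String × String))) :=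
  [("h1", [("URL", "u1"), ("ACTIVEON", "w1")]),
   ("h2", [("URL", "u2"), ("ACTIVEON", "None")]),
   ("h3", [("NOTE", "x")]),
   ("h4", [("URL", "u3"), ("ACTIVEON", "w1")])]
def Spec_fetchOpenWindows (heading_dict : List (String × List (String × String))) (out : List (String × List String)) : Prop := out = fetchOpenWindows_alt heading_dict
instance (heading_dict : List (String × List (String × String))) (out : List (String × List String)) : Decidable (Spec_fetchOpenWindows heading_dict out) := by unfold Spec_fetchOpenWindows; infer_instance

-- ===== CLAIM (what is proved, stated in full; the proofs are below) =====
def Claim_equal_fetchOpenWindows : Prop := ∀ (heading_dict : List (String × List (String × String))), Dom_fetchOpenWindows heading_dict → Pre_fetchOpenWindows heading_dict → Spec_fetchOpenWindows heading_dict (fetchOpenWindows heading_dict)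

-- ===== LEMMAS AND PROOFS =====

-- the extracted (ACTIVEON, URL) pairs, as B computes them
def pvPairs (heading_dict : List (String × List (String × String))) : List (String × String) :=
  heading_dict.filterMap (fun hp =>
    let props := PySem.Dict.ofList hp.2
    if props.contains "URL" then some (props.getD "ACTIVEON" "", props.getD "URL" "") else none)

-- A's loop over heading_dict is the grouping fold over the filtered pairs
theorem pv_foldA (heading_dict : List (String × List (String × String)))
    (w : PySem.Dict String (List String)) :
    heading_dict.foldl (fun (windows : PySem.Dict String (List String)) hp =>
      let props := PySem.Dict.ofList hp.2
      if props.contains "URL" = false then windows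
      else if props.getD "ACTIVEON" "" = "None" then windows
      else if windows.contains (props.getD "ACTIVEON" "") then
        windows.modify (props.getD "ACTIVEON" "") [] (· ++ [props.getD "URL" ""])
      else windows.insert (props.getD "ACTIVEON" "") [props.getD "URL" ""]) w
    = ((pvPairs heading_dict).filter (fun kv => kv.1 ≠ "None")).foldl
        (fun d p => d.modify p.1 [] (· ++ [p.2])) w := by
  induction heading_dict generalizing w with
  | nil => rfl
  | cons hp tl ih =>
    simp only [pvPairs] at ih ⊢
    rw [List.filterMap_cons]
    by_cases hurl : (PySem.Dict.ofList hp.2).contains "URL" = true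
    · by_cases hnone : (PySem.Dict.ofList hp.2).getD "ACTIVEON" "" = "None"
      · simp [hurl, hnone, ih]
      · have hstep : ∀ (w : PySem.Dict String (List String)),
            (if w.contains ((PySem.Dict.ofList hp.2).getD "ACTIVEON" "") = true then
               w.modify ((PySem.Dict.ofList hp.2).getD "ACTIVEON" "") []
                 (· ++ [(PySem.Dict.ofList hp.2).getD "URL" ""])
             else w.insert ((PySem.Dict.ofList hp.2).getD "ACTIVEON" "")
                 [(PySem.Dict.ofList hp.2).getD "URL" ""])
            = w.modify ((PySem.Dict.ofList hp.2).getD "ACTIVEON" "") []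
                (· ++ [(PySem.Dict.ofList hp.2).getD "URL" ""]) := by
          intro w
          by_cases hc : w.contains ((PySem.Dict.ofList hp.2).getD "ACTIVEON" "") = true
          · rw [if_pos hc]
          · rw [if_neg hc]
            have hm : w.modify ((PySem.Dict.ofList hp.2).getD "ACTIVEON" "") []
                  (· ++ [(PySem.Dict.ofList hp.2).getD "URL" ""])
                = w.insert ((PySem.Dict.ofList hp.2).getD "ACTIVEON" "")
                  (w.getD ((PySem.Dict.ofList hp.2).getD "ACTIVEON" "") []
                    ++ [(PySem.Dict.ofList hp.2).getD "URL" ""]) := rfl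
            rw [hm, PySem.Dict.getD_of_not_contains w [] (by simpa using hc)]
            simp
        simp [hurl, hnone, hstep, ih]
    · have hurl2 : (PySem.Dict.ofList hp.2).contains "URL" = false := by simpa using hurl
      simp [hurl2, ih]

-- B's distinct-key loop computes Set.update [] of the filtered keys
theorem pv_keysB (pairs : List (String × String)) (ks : PySem.Set String) :
    pairs.foldl (fun ks kv => if kv.1 ≠ "None" ∧ kv.1 ∉ ks then ks ++ [kv.1] else ks) ks
    = PySem.Set.update ks ((pairs.filter (fun kv => kv.1 ≠ "None")).map (·.1)) := by
  induction pairs generalizing ks with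
  | nil => rfl
  | cons kv tl ih =>
    by_cases hnone : kv.1 = "None"
    · simp [hnone, ih]
    · by_cases hmem : kv.1 ∈ ks
      · simp [hnone, hmem, ih, PySem.Set.update_cons]
      · simp [hnone, hmem, ih, PySem.Set.update_cons]

-- for a key that is not "None", filtering the pairs directly and filtering the
-- "None"-free pairs select the same elements
theorem pv_filter_eq (pairs : List (String × String)) (k : String) (hk : k ≠ "None") :
    (pairs.filter (fun kv => kv.1 ≠ "None")).filter (fun kv => kv.1 == k)
    = pairs.filter (fun kv => kv.1 == k) := by
  rw [List.filter_filter]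
  apply List.filter_congr
  intro kv _
  by_cases h : kv.1 = k
  · simp [h, hk]
  · simp [h]

-- A's grouping fold over the filtered pairs, evaluated to keys + per-key filters
theorem pv_group (P : List (String × String)) :
    ((P.filter (fun kv => kv.1 ≠ "None")).foldl
        (fun d p => d.modify p.1 [] (· ++ [p.2])) PySem.Dict.empty).items
    = (PySem.Set.update ([] : PySem.Set String)
        ((P.filter (fun kv => kv.1 ≠ "None")).map (·.1))).map
        (fun k => (k, (P.filter (fun kv => kv.1 == k)).map (·.2))) := by
  have hnd : ((P.filter (fun kv => kv.1 ≠ "None")).foldl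
      (fun d p => d.modify p.1 [] (· ++ [p.2])) PySem.Dict.empty).keys.Nodup :=
    PySem.Dict.nodup_keys_foldl_modify_key (P.filter (fun kv => kv.1 ≠ "None"))
      (fun p => p.1) [] (fun _ p => (· ++ [p.2])) PySem.Dict.empty PySem.Dict.nodup_keys_empty
  have hkeys : ((P.filter (fun kv => kv.1 ≠ "None")).foldl
      (fun d p => d.modify p.1 [] (· ++ [p.2])) PySem.Dict.empty).keys
      = PySem.Set.update PySem.Dict.empty.keys ((P.filter (fun kv => kv.1 ≠ "None")).map (·.1)) :=
    PySem.Dict.keys_foldl_modify_key (P.filter (fun kv => kv.1 ≠ "None"))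
      (fun p => p.1) [] (fun _ p => (· ++ [p.2])) PySem.Dict.empty
  rw [PySem.Dict.items_eq_map_keys _ hnd [], hkeys]
  simp only [PySem.Dict.keys_empty]
  apply List.map_congr_left
  intro k hk
  have hkne : k ≠ "None" := by
    rcases (PySem.Set.mem_update _ _ _).mp hk with h | h
    · simp at h
    · rcases List.mem_map.mp h with ⟨kv, hkv, rfl⟩
      simpa using (List.of_mem_filter hkv)
  rw [PySem.Dict.getD_foldl_modify_append, PySem.Dict.getD_empty, List.nil_append,
    pv_filter_eq P k hkne]

-- ===== VERDICT (by name: the statement is the Claim_ definition above) =====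
theorem fetchOpenWindows_spec : Claim_equal_fetchOpenWindows := by
  intro hd _ _
  show fetchOpenWindows hd = fetchOpenWindows_alt hd
  simp only [fetchOpenWindows, fetchOpenWindows_alt]
  rw [pv_foldA]
  simp only [pvPairs]
  rw [pv_group, pv_keysB]
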